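-- pv_equiv track=rewrite | github.com/qwer312132/gauge_reading | read/read.py | version2_distance
-- ===== SOURCE A (Python) =====
-- def version2_distance(matrix):
--     ones_positions = [(i, j) for i, row in enumerate(matrix) for j, value in enumerate(row) if value == 1]
--     max_points2 = ones_positions[0]
--     min_points2 = ones_positions[0]
--
--     for i in range(len(ones_positions)):
--         if ones_positions[i][0] > max_points2[0] or (ones_positions[i][0] == max_points2[0] and ones_positions[i][1] > max_points2[1]):
--             max_points2 = ones_positions[i]
--
--         if ones_positions[i][0] < min_points2[0] or (ones_positions[i][0] == min_points2[0] and ones_positions[i][1] < min_points2[1]):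
--             min_points2 = ones_positions[i]
--
--     return max_points2,min_points2
-- ===== SOURCE B (Python) =====
-- def version2_distance(matrix):
--     ones_positions = [(i, j) for i, row in enumerate(matrix) for j, value in enumerate(row) if value == 1]
--     # row-major generation order is already lexicographic, so the extremes are the endpoints
--     return ones_positions[-1], ones_positions[0]
-- ===== Notes on version B (the rewrite author's own statement) =====
-- stated objective: simpler
-- what changed: B drops A's explicit max/min scan loop entirely: the row-major comprehension is already lexicographically sorted, so B returns its last and first elements directly.
import Mathlib
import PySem

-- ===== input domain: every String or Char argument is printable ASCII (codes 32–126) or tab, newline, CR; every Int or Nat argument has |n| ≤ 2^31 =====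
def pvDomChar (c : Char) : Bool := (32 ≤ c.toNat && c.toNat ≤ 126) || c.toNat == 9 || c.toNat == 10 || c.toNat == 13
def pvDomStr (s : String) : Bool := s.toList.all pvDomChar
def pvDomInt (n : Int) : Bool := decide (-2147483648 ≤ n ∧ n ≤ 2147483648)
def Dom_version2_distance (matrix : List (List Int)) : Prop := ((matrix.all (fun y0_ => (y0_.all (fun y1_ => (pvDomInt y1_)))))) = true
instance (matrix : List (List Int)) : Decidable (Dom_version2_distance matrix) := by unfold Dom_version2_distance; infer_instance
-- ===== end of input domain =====

-- B replaces A's explicit max/min scan with O(1) endpoint selection on the already lexicographically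
-- sorted row-major comprehension (objective: simpler). Inputs with no 1s (Python IndexError) are outside Pre_.


-- ===== PORT A =====
-- the shared comprehension: [(i, j) for i, row in enumerate(matrix) for j, value in enumerate(row) if value == 1]
def onesPositions (matrix : List (List Int)) : List (Int × Int) :=
  (PySem.List.enumerate matrix).flatMap (fun ir =>
    (PySem.List.enumerate ir.2).filterMap (fun jv =>
      if jv.2 = 1 then some (ir.1, jv.1) else none))

-- one iteration of A's for-loop body
def stepA (acc : (Int × Int) × (Int × Int)) (q : Int × Int) : (Int × Int) × (Int × Int) :=
  let mx := if q.1 > acc.1.1 ∨ (q.1 = acc.1.1 ∧ q.2 > acc.1.2) then q else acc.1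
  let mn := if q.1 < acc.2.1 ∨ (q.1 = acc.2.1 ∧ q.2 < acc.2.2) then q else acc.2
  (mx, mn)

def version2_distance (matrix : List (List Int)) : (Int × Int) × (Int × Int) :=
  match onesPositions matrix with
  | [] => ((0, 0), (0, 0))   -- Python raises IndexError at ones_positions[0]; excluded by Pre_
  | p0 :: rest => (p0 :: rest).foldl stepA (p0, p0)

-- ===== PORT B =====
def version2_distance_alt (matrix : List (List Int)) : (Int × Int) × (Int × Int) :=
  let ones := onesPositions matrix
  ((PySem.List.pyGet? ones (-1)).getD (0, 0),   -- ones_positions[-1]; none (IndexError) excluded by Pre_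
   (PySem.List.pyGet? ones 0).getD (0, 0))      -- ones_positions[0]

-- ===== PRECONDITION & SPEC =====
-- Pre_ excludes matrices containing no entry equal to 1, on which Python A (and B) raise IndexError.
def Pre_version2_distance (matrix : List (List Int)) : Prop :=
  ∃ row ∈ matrix, (1 : Int) ∈ row
instance (matrix : List (List Int)) : Decidable (Pre_version2_distance matrix) := by unfold Pre_version2_distance; infer_instance

def pvWitness_version2_distance : List (List Int) := [[0, 1], [1, 0]]

def Spec_version2_distance (matrix : List (List Int)) (out : (Int × Int) × (Int × Int)) : Prop := out = version2_distance_alt matrix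
instance (matrix : List (List Int)) (out : (Int × Int) × (Int × Int)) : Decidable (Spec_version2_distance matrix out) := by unfold Spec_version2_distance; infer_instance

-- ===== CLAIM (what is proved, stated in full; the proofs are below) =====
def Claim_equal_version2_distance : Prop := ∀ (matrix : List (List Int)), Dom_version2_distance matrix → Pre_version2_distance matrix → Spec_version2_distance matrix (version2_distance matrix)

-- ===== LEMMAS AND PROOFS =====

-- strict lexicographic order on positions
def llt (p q : Int × Int) : Prop := p.1 < q.1 ∨ (p.1 = q.1 ∧ p.2 < q.2)

theorem llt_asymm {p q : Int × Int} (h : llt p q) : ¬ llt q p := by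
  unfold llt at *; omega

theorem mem_inner {i : Int} {row : List Int} {x : Int × Int}
    (hx : x ∈ (PySem.List.enumerate row).filterMap (fun jv =>
      if jv.2 = 1 then some (i, jv.1) else none)) : x.1 = i := by
  rcases List.mem_filterMap.1 hx with ⟨jv, _, hjv⟩
  split at hjv
  · cases hjv; rfl
  · cases hjv

theorem pairwise_inner (i : Int) (row : List Int) :
    ((PySem.List.enumerate row).filterMap (fun jv =>
      if jv.2 = 1 then some (i, jv.1) else none)).Pairwise llt := by
  have h := PySem.List.pairwise_lt_enumerate (xs := row) (s := 0)
  refine List.Pairwise.filterMap _ (fun a b hab => ?_) h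
  intro x hx y hy
  by_cases ha : a.2 = 1 <;> by_cases hb : b.2 = 1 <;>
    simp [ha, hb] at hx hy
  rw [← hx, ← hy]
  exact Or.inr ⟨rfl, hab⟩

theorem pairwise_ones (matrix : List (List Int)) : (onesPositions matrix).Pairwise llt := by
  unfold onesPositions
  have h := PySem.List.pairwise_lt_enumerate (xs := matrix) (s := 0)
  rw [List.pairwise_flatMap]
  constructor
  · intro ir _; exact pairwise_inner ir.1 ir.2
  · refine h.imp_of_mem ?_
    intro ir ir' _ _ hlt x hx y hy
    have h1 := mem_inner hx
    have h2 := mem_inner hy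
    exact Or.inl (by omega)

-- A's loop on a sorted tail: the max keeps moving to the current element, the min never moves
theorem foldl_sorted (l : List (Int × Int)) :
    ∀ (mx mn : Int × Int), l.Pairwise llt → (∀ p ∈ l, llt mx p) → (∀ p ∈ l, ¬ llt p mn) →
    l.foldl stepA (mx, mn) = (l.getLastD mx, mn) := by
  induction l with
  | nil => intro mx mn _ _ _; rfl
  | cons p rest ih =>
    intro mx mn hpw hmx hmn
    have hpmx : llt mx p := hmx p (List.mem_cons_self)
    have hpmn : ¬ llt p mn := hmn p (List.mem_cons_self)
    have hstep : stepA (mx, mn) p = (p, mn) := by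
      unfold stepA llt at *
      simp only
      rw [if_pos (by omega), if_neg (by omega)]
    rw [List.foldl_cons, hstep, List.getLastD_cons]
    exact ih p mn (List.pairwise_cons.1 hpw).2
      (fun q hq => (List.pairwise_cons.1 hpw).1 q hq)
      (fun q hq => hmn q (List.mem_cons_of_mem p hq))

theorem ones_ne_nil {matrix : List (List Int)} (h : Pre_version2_distance matrix) :
    onesPositions matrix ≠ [] := by
  rcases h with ⟨row, hrow, h1⟩
  rcases List.mem_iff_getElem.1 hrow with ⟨k, hk, rfl⟩
  rcases List.mem_iff_getElem.1 h1 with ⟨j, hj, hj1⟩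
  unfold onesPositions
  intro hnil
  rw [List.flatMap_eq_nil_iff] at hnil
  have hmem : ((k : Int), matrix[k]) ∈ PySem.List.enumerate matrix := by
    rw [PySem.List.mem_enumerate_iff]; exact ⟨k, hk, by simp⟩
  have := hnil _ hmem
  rw [List.filterMap_eq_nil_iff] at this
  have hjv : ((j : Int), matrix[k][j]) ∈ PySem.List.enumerate matrix[k] := by
    rw [PySem.List.mem_enumerate_iff]; exact ⟨j, hj, by simp⟩
  have := this _ hjv
  simp [hj1] at this

-- ===== VERDICT (by name: the statement is the Claim_ definition above) =====
theorem version2_distance_spec : Claim_equal_version2_distance := by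
  intro matrix _ hpre
  unfold Spec_version2_distance version2_distance version2_distance_alt
  have hne := ones_ne_nil hpre
  obtain ⟨p0, rest, hcons⟩ := List.exists_cons_of_ne_nil hne
  rw [hcons]
  have hpw := pairwise_ones matrix
  rw [hcons] at hpw
  have hpw' := List.pairwise_cons.1 hpw
  have hstep0 : stepA (p0, p0) p0 = (p0, p0) := by
    unfold stepA; simp
  show (p0 :: rest).foldl stepA (p0, p0) =
    ((PySem.List.pyGet? (p0 :: rest) (-1)).getD (0, 0),
     (PySem.List.pyGet? (p0 :: rest) 0).getD (0, 0))
  rw [List.foldl_cons, hstep0,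
    foldl_sorted rest p0 p0 hpw'.2 hpw'.1 (fun q hq => llt_asymm (hpw'.1 q hq))]
  have hlast : (p0 :: rest).getLast? = some (rest.getLastD p0) := by
    rw [List.getLast?_cons]
    simp [List.getLastD_eq_getLast?]
  rw [PySem.List.pyGet?_neg_one, hlast]
  simp
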